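-- pv_equiv track=rewrite | github.com/brandonviaje/LeetCode | 2228-watering-plants-ii/watering-plants-ii.py | minimumRefill
-- ===== SOURCE A (Python) =====
-- from typing import List
--
-- def minimumRefill(plants: List[int], capacityA: int, capacityB: int) -> int:
--     """
--     two pointers
--
--     alice: left to right
--     bob: right to left
--
--     return num of times alice and bob have to refill to water all plants
--     intuition: subtract from capacity then we have to do a  check if its < the current plant they're on
--     if it is, then increment refills and set capacityA back to starting same thing for capcityB
--
--     [1,2,4,4,5]
--          ^
--          ^
--     alice = 3
--     bob = 5
--     refill = 1
--     """
--     # capture the initial capacity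
--     alice = capacityA
--     bob = capacityB
--     refill = 0
--
--     l,r = 0,len(plants)-1
--
--     while l < r:
--         # refill if alice cant water current plant
--         if capacityA < plants[l]:
--             refill += 1
--             capacityA = alice
--
--         # refill if bob cant water current plant
--         if capacityB < plants[r]:
--             refill += 1
--             capacityB = bob
--
--         # update capacity and pointers
--         capacityA -= plants[l]
--         capacityB -= plants[r]
--
--         l += 1
--         r -= 1
--
--     # case if theres one last plant in the middle
--     if l == r:
--         # whichever has more water tries to water it
--         if max(capacityA, capacityB) < plants[l]:
--             refill += 1
--
--     return refill
-- ===== SOURCE B (Python) =====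
-- from typing import List
--
-- def _water(seq: List[int], cap: int) -> tuple:
--     """Greedy maximal-run partition for one gardener: repeatedly strip the
--     longest run of plants the current can covers; each stranded plant costs one
--     refill and starts the next run already watered. Returns (refills, remaining)."""
--     i, n = 0, len(seq)
--     rem, cnt = cap, 0
--     while i < n:
--         # strip the maximal waterable run
--         while i < n and rem >= seq[i]:
--             rem -= seq[i]
--             i += 1
--         if i < n:
--             cnt += 1
--             rem = cap - seq[i]
--             i += 1
--     return cnt, rem
--
-- def minimumRefill(plants: List[int], capacityA: int, capacityB: int) -> int:
--     n = len(plants)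
--     h = n // 2
--     ca, ra = _water(plants[:h], capacityA)
--     cb, rb = _water(plants[n - h:][::-1], capacityB)
--     total = ca + cb
--     if n % 2 == 1 and max(ra, rb) < plants[h]:
--         total += 1
--     return total
-- ===== Notes on version B (the rewrite author's own statement) =====
-- stated objective: alternative
-- what changed: Replaces A's simultaneous two-pointer per-plant simulation with a greedy maximal-run partition: a shared one-gardener helper strips the longest run of plants a full can covers in an inner loop and counts one refill per stranded plant, applied separately to the first half and the reversed second half, plus a separate middle-plant check.
import Mathlib
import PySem

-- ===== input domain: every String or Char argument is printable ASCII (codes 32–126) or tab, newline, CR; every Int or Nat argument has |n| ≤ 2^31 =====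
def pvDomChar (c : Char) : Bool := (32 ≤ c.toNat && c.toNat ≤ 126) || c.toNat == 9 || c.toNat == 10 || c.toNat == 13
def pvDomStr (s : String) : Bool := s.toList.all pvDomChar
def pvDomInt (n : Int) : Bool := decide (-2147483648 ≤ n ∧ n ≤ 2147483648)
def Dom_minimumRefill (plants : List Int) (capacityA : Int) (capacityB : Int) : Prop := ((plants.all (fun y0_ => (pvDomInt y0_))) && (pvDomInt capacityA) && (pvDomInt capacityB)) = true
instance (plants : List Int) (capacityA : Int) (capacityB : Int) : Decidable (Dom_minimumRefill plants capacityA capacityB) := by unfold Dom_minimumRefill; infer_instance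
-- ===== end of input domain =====

-- B replaces A's simultaneous two-pointer per-plant simulation by a greedy maximal-run
-- partition per gardener (inner run-stripping loop + one refill per stranded plant),
-- run separately on the two halves, plus a middle-plant check (objective: alternative).

-- ===== PORT A =====
-- A's while loop; plants[l] / plants[r] are always in range when read (0 ≤ l < r ≤ n-1,
-- and l = r only with 0 ≤ l < n), so pyGetD's default is never taken.
def loopA (plants : List Int) (alice bob capA capB l r refill : Int) : Int :=
  if hlr : l < r then
    let pL := PySem.List.pyGetD plants l 0
    let pR := PySem.List.pyGetD plants r 0
    let refill1 := if capA < pL then refill + 1 else refill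
    let capA1 := if capA < pL then alice else capA
    let refill2 := if capB < pR then refill1 + 1 else refill1
    let capB1 := if capB < pR then bob else capB
    loopA plants alice bob (capA1 - pL) (capB1 - pR) (l + 1) (r - 1) refill2
  else if l = r then
    (if max capA capB < PySem.List.pyGetD plants l 0 then refill + 1 else refill)
  else refill
termination_by (r - l).toNat
decreasing_by omega

def minimumRefill (plants : List Int) (capacityA : Int) (capacityB : Int) : Int :=
  loopA plants capacityA capacityB capacityA capacityB 0 ((plants.length : Int) - 1) 0

-- ===== PORT B =====
-- B's inner loop: strip the maximal run of plants the current water covers,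
-- returning the stranded suffix and the water left
def strip : List Int → Int → List Int × Int
  | [], rem => ([], rem)
  | p :: ps, rem => if rem ≥ p then strip ps (rem - p) else (p :: ps, rem)

-- needed only so that `water`'s recursion on the stranded suffix is seen to terminate
theorem strip_length_le : ∀ (seq : List Int) (rem : Int), (strip seq rem).1.length ≤ seq.length := by
  intro seq
  induction seq with
  | nil => intro rem; simp [strip]
  | cons p ps ih =>
    intro rem
    by_cases h : rem ≥ p
    · simp only [strip, h, if_pos]
      exact le_trans (ih (rem - p)) (by simp)
    · simp [strip, h]

-- B's outer loop: each stranded plant costs one refill and starts the next run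
-- with a freshly filled can already spent on it
def water (seq : List Int) (rem cap cnt : Int) : Int × Int :=
  match hs : strip seq rem with
  | ([], r) => (cnt, r)
  | (p :: ps, _) => water ps (cap - p) cap (cnt + 1)
termination_by seq.length
decreasing_by
  have h := strip_length_le seq rem
  rw [hs] at h
  simp at h
  omega

-- plants[:h] with 0 ≤ h ≤ n is exactly List.take h; plants[n-h:] is List.drop (n-h);
-- plants[h] is read only when n is odd, hence in range: List.getD h 0 is exact there.
def minimumRefill_alt (plants : List Int) (capacityA : Int) (capacityB : Int) : Int :=
  let n := plants.length
  let h := n / 2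
  let a := water (plants.take h) capacityA capacityA 0
  let b := water ((plants.drop (n - h)).reverse) capacityB capacityB 0
  let total := a.1 + b.1
  if n % 2 = 1 ∧ max a.2 b.2 < plants.getD h 0 then total + 1 else total

-- ===== PRECONDITION & SPEC =====
def Spec_minimumRefill (plants : List Int) (capacityA : Int) (capacityB : Int) (out : Int) : Prop := out = minimumRefill_alt plants capacityA capacityB
instance (plants : List Int) (capacityA : Int) (capacityB : Int) (out : Int) : Decidable (Spec_minimumRefill plants capacityA capacityB out) := by unfold Spec_minimumRefill; infer_instance

-- ===== CLAIM (what is proved, stated in full; the proofs are below) =====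
def Claim_equal_minimumRefill : Prop := ∀ (plants : List Int) (capacityA : Int) (capacityB : Int), Dom_minimumRefill plants capacityA capacityB → Spec_minimumRefill plants capacityA capacityB (minimumRefill plants capacityA capacityB)

-- ===== LEMMAS AND PROOFS =====

-- proof-only abstraction: one plain per-plant step of a single gardener's pass
def passStep (cap0 : Int) (st : Int × Int) (p : Int) : Int × Int :=
  let st1 := if st.2 < p then (st.1 + 1, cap0) else st
  (st1.1, st1.2 - p)

-- the refill counter of a per-plant pass is additive in its starting value
theorem pass_shift (cap0 : Int) (xs : List Int) : ∀ (r c : Int),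
    xs.foldl (passStep cap0) (r, c) =
      (r + (xs.foldl (passStep cap0) (0, c)).1, (xs.foldl (passStep cap0) (0, c)).2) := by
  induction xs with
  | nil => intro r c; simp
  | cons p ps ih =>
    intro r c
    simp only [List.foldl_cons]
    by_cases hc : c < p
    · simp only [passStep, hc, if_pos]
      rw [ih (r + 1), ih (0 + 1)]
      simp only [Prod.mk.injEq]
      exact ⟨by ring, trivial⟩
    · simp only [passStep, hc, if_neg, not_false_iff]
      rw [ih r, ih 0]

-- unfolding water when the head of the list is covered by the current water
theorem water_cons_le (p : Int) (ps : List Int) (rem cap cnt : Int) (hp : p ≤ rem) :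
    water (p :: ps) rem cap cnt = water ps (rem - p) cap cnt := by
  rw [water.eq_def]
  have hstrip : strip (p :: ps) rem = strip ps (rem - p) := by simp [strip, hp]
  rw [hstrip, water.eq_def]

-- unfolding water when the head strands the gardener immediately
theorem water_cons_lt (p : Int) (ps : List Int) (rem cap cnt : Int) (hp : ¬ p ≤ rem) :
    water (p :: ps) rem cap cnt = water ps (cap - p) cap (cnt + 1) := by
  rw [water.eq_def]
  have hstrip : strip (p :: ps) rem = (p :: ps, rem) := by
    simp [strip, hp]
  rw [hstrip]

-- B's nested greedy-run loops compute the same pair as the plain per-plant fold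
theorem water_eq_foldl : ∀ (seq : List Int) (rem cap cnt : Int),
    water seq rem cap cnt =
      (cnt + (seq.foldl (passStep cap) (0, rem)).1, (seq.foldl (passStep cap) (0, rem)).2) := by
  intro seq
  induction seq with
  | nil =>
    intro rem cap cnt
    rw [water.eq_def]
    simp [strip]
  | cons p ps ih =>
    intro rem cap cnt
    by_cases hp : p ≤ rem
    · rw [water_cons_le p ps rem cap cnt hp, ih]
      have hstep : passStep cap (0, rem) p = (0, rem - p) := by
        simp [passStep, show ¬ rem < p by omega]
      simp only [List.foldl_cons, hstep]
    · rw [water_cons_lt p ps rem cap cnt hp, ih]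
      have hstep : passStep cap (0, rem) p = (1, cap - p) := by
        simp [passStep, show rem < p by omega]
      simp only [List.foldl_cons, hstep]
      rw [pass_shift cap ps 1 (cap - p)]
      simp only [Prod.mk.injEq]
      exact ⟨by ring, trivial⟩

-- the heart of the proof: A's two-pointer loop, started at pointers i and n-1-i, equals
-- the per-plant-fold decomposition restricted to the still-unwatered prefix/suffix segments
theorem loop_eq (plants : List Int) (alice bob : Int) :
    ∀ (k i : Nat), plants.length / 2 - i = k → i ≤ plants.length / 2 →
    ∀ (capA capB refill : Int),
    loopA plants alice bob capA capB (i : Int) ((plants.length : Int) - 1 - (i : Int)) refill =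
      refill +
      (if plants.length % 2 = 1 ∧
          max (((plants.drop i).take (plants.length / 2 - i)).foldl (passStep alice) (0, capA)).2
            ((((plants.take (plants.length - i)).drop
                (plants.length - plants.length / 2)).reverse).foldl (passStep bob) (0, capB)).2
          < plants.getD (plants.length / 2) 0
       then (((plants.drop i).take (plants.length / 2 - i)).foldl (passStep alice) (0, capA)).1
            + ((((plants.take (plants.length - i)).drop
                (plants.length - plants.length / 2)).reverse).foldl (passStep bob) (0, capB)).1 + 1
       else (((plants.drop i).take (plants.length / 2 - i)).foldl (passStep alice) (0, capA)).1
            + ((((plants.take (plants.length - i)).drop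
                (plants.length - plants.length / 2)).reverse).foldl (passStep bob) (0, capB)).1) := by
  intro k
  induction k with
  | zero =>
    intro i hk hi capA capB refill
    have hih : i = plants.length / 2 := by omega
    subst hih
    have hempB : (plants.take (plants.length - plants.length / 2)).drop
        (plants.length - plants.length / 2) = [] :=
      List.drop_eq_nil_of_le (by simp)
    have hmid : PySem.List.pyGetD plants ((plants.length / 2 : Nat) : Int) 0
        = plants.getD (plants.length / 2) 0 := PySem.List.pyGetD_natCast _ _ _
    rw [loopA]
    by_cases hodd : plants.length % 2 = 1
    · have heq : ((plants.length / 2 : Nat) : Int)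
          = (plants.length : Int) - 1 - ((plants.length / 2 : Nat) : Int) := by omega
      rw [dif_neg (by omega), if_pos heq, hempB, hmid]
      simp only [Nat.sub_self, List.take_zero, List.reverse_nil, List.foldl_nil, hodd, true_and]
      split_ifs <;> ring
    · have hne : ¬ ((plants.length / 2 : Nat) : Int)
          = (plants.length : Int) - 1 - ((plants.length / 2 : Nat) : Int) := by omega
      rw [dif_neg (by omega), if_neg hne, hempB]
      simp [hodd]
  | succ k ih =>
    intro i hk hi capA capB refill
    set n := plants.length with hn
    have hih : i < n / 2 := by omega
    have hin : i < n := by omega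
    have hrn : n - 1 - i < n := by omega
    have hlr : (i : Int) < (n : Int) - 1 - (i : Int) := by omega
    -- index values
    have hpL : PySem.List.pyGetD plants (i : Int) 0 = plants[i] := by
      rw [PySem.List.pyGetD_natCast]; exact List.getD_eq_getElem _ _ hin
    have hpR : PySem.List.pyGetD plants ((n : Int) - 1 - (i : Int)) 0 = plants[n - 1 - i] := by
      have h0 : (n : Int) - 1 - (i : Int) = ((n - 1 - i : Nat) : Int) := by omega
      rw [h0, PySem.List.pyGetD_natCast]; exact List.getD_eq_getElem _ _ hrn
    -- segment decompositions
    have hA : (plants.drop i).take (n / 2 - i)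
        = plants[i] :: (plants.drop (i + 1)).take (n / 2 - (i + 1)) := by
      rw [List.drop_eq_getElem_cons hin]
      have h0 : n / 2 - i = (n / 2 - (i + 1)) + 1 := by omega
      rw [h0, List.take_succ_cons]
    have hB : ((plants.take (n - i)).drop (n - n / 2)).reverse
        = plants[n - 1 - i] :: ((plants.take (n - 1 - i)).drop (n - n / 2)).reverse := by
      have h1 : n - i = (n - 1 - i) + 1 := by omega
      have h3 : plants.take ((n - 1 - i) + 1)
          = plants.take (n - 1 - i) ++ [plants[n - 1 - i]] := by
        rw [List.take_add_one, List.getElem?_eq_getElem hrn]; rfl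
      have h4 : n - n / 2 ≤ (plants.take (n - 1 - i)).length := by
        rw [List.length_take]; omega
      rw [h1, h3, List.drop_append_of_le_length h4, List.reverse_append]
      rfl
    have hidx : n - (i + 1) = n - 1 - i := by omega
    -- unfold one loop iteration
    rw [loopA, dif_pos hlr]
    simp only [hpL, hpR]
    -- apply the induction hypothesis at i+1
    have harg : (i : Int) + 1 = ((i + 1 : Nat) : Int) := by omega
    have harg2 : (n : Int) - 1 - (i : Int) - 1 = (n : Int) - 1 - ((i + 1 : Nat) : Int) := by
      omega
    rw [harg, harg2, ih (i + 1) (by omega) (by omega)]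
    rw [hidx, hA, hB]
    simp only [List.foldl_cons]
    set xsA := (plants.drop (i + 1)).take (n / 2 - (i + 1)) with hxsA
    set ysB := ((plants.take (n - 1 - i)).drop (n - n / 2)).reverse with hysB
    by_cases hcA : capA < plants[i] <;> by_cases hcB : capB < plants[n - 1 - i]
    · simp only [passStep, hcA, hcB, if_pos]
      rw [pass_shift alice xsA (0 + 1) (alice - plants[i]),
        pass_shift bob ysB (0 + 1) (bob - plants[n - 1 - i])]
      split_ifs <;> ring
    · simp only [passStep, hcA, hcB, if_pos, if_neg, not_false_iff]
      rw [pass_shift alice xsA (0 + 1) (alice - plants[i])]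
      split_ifs <;> ring
    · simp only [passStep, hcA, hcB, if_pos, if_neg, not_false_iff]
      rw [pass_shift bob ysB (0 + 1) (bob - plants[n - 1 - i])]
      split_ifs <;> ring
    · simp only [passStep, hcA, hcB, if_neg, not_false_iff]

-- ===== VERDICT (by name: the statement is the Claim_ definition above) =====
theorem minimumRefill_spec : Claim_equal_minimumRefill := by
  intro plants capA capB _
  unfold Spec_minimumRefill minimumRefill minimumRefill_alt
  have h := loop_eq plants capA capB (plants.length / 2) 0 (by omega) (by omega) capA capB 0
  simp only [Nat.cast_zero, sub_zero, List.drop_zero, Nat.sub_zero, List.take_length,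
    zero_add] at h
  rw [h]
  simp [water_eq_foldl]
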